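-- pv_equiv track=rewrite | github.com/elephantrobotics/p340_ai | src/api/writing_api.py | __merge_segments_to_paths
-- ===== SOURCE A (Python) =====
-- def __merge_segments_to_paths(segments):
--     """将一堆线段首尾拼接成连续的路径, 是write_ascii_char函数的子函数
--
--     Examples:
--         Input:
--             segments = [
--                 ((1, 1), (2, 2)),
--                 ((2, 2), (3, 3)),
--                 ((4, 4), (5, 5)),
--             ]
--         Output:
--             [
--                 [(1, 1), (2, 2), (3, 3)],
--                 [(4, 4), (5, 5)]
--             ]
--     """
--     segs = [((x1, y1), (x2, y2)) for ((x1, y1), (x2, y2)) in segments]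
--     paths = []
--     # 不断从segs中取出线段并合并成路径
--     while segs:
--         (start, end) = segs.pop(0)
--         path = [start, end]
--         # 1. 向后拓展路径
--         extended = True
--         while extended:
--             extended = False
--             for idx, ((x1, y1), (x2, y2)) in enumerate(segs):
--                 if (x1, y1) == path[-1]: path.append((x2, y2)); segs.pop(idx); extended = True; break
--                 elif (x2, y2) == path[-1]: path.append((x1, y1)); segs.pop(idx); extended = True; break
--         # 2. 向前拓展路径
--         extended = True
--         while extended:
--             extended = False
--             for idx, ((x1, y1), (x2, y2)) in enumerate(segs):
--                 if (x2, y2) == path[0]: path.insert(0, (x1, y1)); segs.pop(idx); extended = True; break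
--                 elif (x1, y1) == path[0]: path.insert(0, (x2, y2)); segs.pop(idx); extended = True; break
--         paths.append(path)
--     return paths
-- ===== SOURCE B (Python) =====
-- def __merge_segments_to_paths(segments):
--     """Merge line segments into chained paths (same result as the O(n^2) scan),
--     using a point -> occurrence-list index for O(1) amortized extension lookups."""
--     segs = [((x1, y1), (x2, y2)) for ((x1, y1), (x2, y2)) in segments]
--     n = len(segs)
--     # occ[p] lists (index, other_endpoint) for every segment touching p, in index order
--     occ = {}
--     for i, (a, b) in enumerate(segs):
--         occ.setdefault(a, []).append((i, b))
--         if b != a: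
--             occ.setdefault(b, []).append((i, a))
--     alive = [True] * n
--     cur = {}  # per-point cursor into occ[p]: everything before it is consumed
--
--     def take(p):
--         lst = occ.get(p)
--         if lst is None:
--             return None
--         k = cur.get(p, 0)
--         while k < len(lst) and not alive[lst[k][0]]:
--             k += 1
--         if k == len(lst):
--             cur[p] = k
--             return None
--         i, other = lst[k]
--         alive[i] = False
--         cur[p] = k + 1
--         return other
--
--     paths = []
--     j = 0
--     while True:
--         while j < n and not alive[j]:
--             j += 1
--         if j == n:
--             break
--         a, b = segs[j]
--         alive[j] = False
--         j += 1
--         tail = [a, b]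
--         pt = b
--         while True:
--             nxt = take(pt)
--             if nxt is None:
--                 break
--             tail.append(nxt)
--             pt = nxt
--         head = []
--         pt = a
--         while True:
--             nxt = take(pt)
--             if nxt is None:
--                 break
--             head.append(nxt)
--             pt = nxt
--         head.reverse()
--         paths.append(head + tail)
--     return paths
-- ===== Notes on version B (the rewrite author's own statement) =====
-- stated objective: faster
-- what changed: Replaces the repeated linear rescans of the remaining segment list (pop(0)/enumerate with restart after every extension) by a precomputed point -> occurrence-list index with per-point cursors and an alive bitmap, so each extension lookup is O(1) amortized.
import Mathlib
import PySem

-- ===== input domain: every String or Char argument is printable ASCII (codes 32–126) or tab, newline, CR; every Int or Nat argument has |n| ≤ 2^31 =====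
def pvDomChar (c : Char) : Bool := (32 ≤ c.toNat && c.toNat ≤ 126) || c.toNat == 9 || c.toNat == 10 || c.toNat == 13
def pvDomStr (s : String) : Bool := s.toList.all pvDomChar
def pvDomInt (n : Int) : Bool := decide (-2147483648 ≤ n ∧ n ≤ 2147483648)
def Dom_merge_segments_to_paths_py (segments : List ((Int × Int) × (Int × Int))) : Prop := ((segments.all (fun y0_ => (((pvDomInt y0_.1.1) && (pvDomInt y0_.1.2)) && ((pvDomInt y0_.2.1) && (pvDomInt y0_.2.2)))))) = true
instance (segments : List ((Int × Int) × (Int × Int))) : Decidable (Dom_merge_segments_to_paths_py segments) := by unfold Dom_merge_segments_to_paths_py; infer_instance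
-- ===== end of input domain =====

-- B replaces A's repeated linear rescans of the remaining segment list by a precomputed
-- point -> occurrence-list index with per-point cursors and an alive bitmap (faster).


-- ===== PORT A =====

-- forward scan of A's tail-extension for-loop: first segment touching p at its start (then end)
def pvFindFwd (p : Int × Int) : List ((Int × Int) × (Int × Int)) → Option (Nat × (Int × Int))
  | [] => none
  | (a, b) :: rest =>
    if a = p then some (0, b)
    else if b = p then some (0, a)
    else (pvFindFwd p rest).map (fun r => (r.1 + 1, r.2))

-- forward scan of A's head-extension for-loop: checks the segment's end first
def pvFindBwd (p : Int × Int) : List ((Int × Int) × (Int × Int)) → Option (Nat × (Int × Int))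
  | [] => none
  | (a, b) :: rest =>
    if b = p then some (0, a)
    else if a = p then some (0, b)
    else (pvFindBwd p rest).map (fun r => (r.1 + 1, r.2))

-- A's "while extended: ... path.append / segs.pop(idx)" tail-extension loop
-- (fuel is only a totality guard: one segment is removed per step, so segs.length + 1 suffices)
def pvExtTail (fuel : Nat) (path : List (Int × Int)) (segs : List ((Int × Int) × (Int × Int))) :
    List (Int × Int) × List ((Int × Int) × (Int × Int)) :=
  match fuel with
  | 0 => (path, segs)
  | fuel + 1 =>
    match pvFindFwd (PySem.List.pyGetD path (-1) (0, 0)) segs with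
    | none => (path, segs)
    | some (i, q) => pvExtTail fuel (path ++ [q]) (segs.eraseIdx i)

-- A's "while extended: ... path.insert(0, ·) / segs.pop(idx)" head-extension loop
def pvExtHead (fuel : Nat) (path : List (Int × Int)) (segs : List ((Int × Int) × (Int × Int))) :
    List (Int × Int) × List ((Int × Int) × (Int × Int)) :=
  match fuel with
  | 0 => (path, segs)
  | fuel + 1 =>
    match pvFindBwd (PySem.List.pyGetD path 0 (0, 0)) segs with
    | none => (path, segs)
    | some (i, q) => pvExtHead fuel (q :: path) (segs.eraseIdx i)

-- a fuel step re-expressed through the new list's own length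
-- A's outer "while segs: (start, end) = segs.pop(0) ..." loop
-- (fuel is only a totality guard: each iteration consumes at least one segment)
def pvMergeLoop (fuel : Nat) (segs : List ((Int × Int) × (Int × Int))) : List (List (Int × Int)) :=
  match fuel with
  | 0 => []
  | fuel + 1 =>
    match segs with
    | [] => []
    | (a, b) :: rest =>
      let r1 := pvExtTail (rest.length + 1) [a, b] rest
      let r2 := pvExtHead (r1.2.length + 1) r1.1 r1.2
      r2.1 :: pvMergeLoop fuel r2.2

def merge_segments_to_paths_py (segments : List ((Int × Int) × (Int × Int))) : List (List (Int × Int)) :=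
  let segs := segments.map (fun s => ((s.1.1, s.1.2), (s.2.1, s.2.2)))
  pvMergeLoop segs.length segs

-- ===== PORT B =====

-- occ[p] = [(index, other endpoint)] for every segment touching p, in index order
def pvOccBuild (segs : List ((Int × Int) × (Int × Int))) :
    PySem.Dict (Int × Int) (List (Nat × (Int × Int))) :=
  segs.zipIdx.foldl
    (fun d e =>
      let a := e.1.1; let b := e.1.2; let i := e.2
      let d1 := d.insert a (d.getD a [] ++ [(i, b)])
      if b ≠ a then d1.insert b (d1.getD b [] ++ [(i, a)]) else d1)
    PySem.Dict.empty

-- "while k < len(lst) and not alive[lst[k][0]]: k += 1"  (fuel = lst.length + 1 suffices)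
def pvSkip (fuel : Nat) (alive : List Bool) (lst : List (Nat × (Int × Int))) (k : Nat) : Nat :=
  match fuel with
  | 0 => k
  | fuel + 1 =>
    if h : k < lst.length then
      if alive.getD (lst[k]).1 false then k else pvSkip fuel alive lst (k + 1)
    else k

-- B's take(p): first still-alive occurrence of p, via the cursor
def pvTake (occ : PySem.Dict (Int × Int) (List (Nat × (Int × Int))))
    (cur : PySem.Dict (Int × Int) Nat) (alive : List Bool) (p : Int × Int) :
    Option (Int × Int) × PySem.Dict (Int × Int) Nat × List Bool :=
  match occ.get? p with
  | none => (none, cur, alive)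
  | some lst =>
    let k := pvSkip (lst.length + 1) alive lst (cur.getD p 0)
    if h : k < lst.length then
      (some (lst[k]).2, cur.insert p (k + 1), alive.set (lst[k]).1 false)
    else (none, cur.insert p k, alive)

-- "while j < n and not alive[j]: j += 1"  (fuel = n + 1 suffices)
def pvSkipIdx (fuel : Nat) (alive : List Bool) (n j : Nat) : Nat :=
  match fuel with
  | 0 => j
  | fuel + 1 =>
    if h : j < n then
      if alive.getD j false then j else pvSkipIdx fuel alive n (j + 1)
    else j

-- B's tail-extension loop: "while True: nxt = take(pt); ... tail.append(nxt); pt = nxt"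
def pvTailLoop (occ : PySem.Dict (Int × Int) (List (Nat × (Int × Int)))) (fuel : Nat)
    (tail : List (Int × Int)) (pt : Int × Int)
    (cur : PySem.Dict (Int × Int) Nat) (alive : List Bool) :
    List (Int × Int) × PySem.Dict (Int × Int) Nat × List Bool :=
  match fuel with
  | 0 => (tail, cur, alive)
  | fuel + 1 =>
    match pvTake occ cur alive pt with
    | (none, cur', alive') => (tail, cur', alive')
    | (some q, cur', alive') => pvTailLoop occ fuel (tail ++ [q]) q cur' alive'

-- B's head-extension loop: collects the extensions, reversed at the end
def pvHeadLoop (occ : PySem.Dict (Int × Int) (List (Nat × (Int × Int)))) (fuel : Nat)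
    (head : List (Int × Int)) (pt : Int × Int)
    (cur : PySem.Dict (Int × Int) Nat) (alive : List Bool) :
    List (Int × Int) × PySem.Dict (Int × Int) Nat × List Bool :=
  match fuel with
  | 0 => (head, cur, alive)
  | fuel + 1 =>
    match pvTake occ cur alive pt with
    | (none, cur', alive') => (head, cur', alive')
    | (some q, cur', alive') => pvHeadLoop occ fuel (head ++ [q]) q cur' alive'

-- B's main loop over the alive cursor j (fuel n+1 suffices: one path per iteration)
def pvMainLoop (occ : PySem.Dict (Int × Int) (List (Nat × (Int × Int))))
    (segs : List ((Int × Int) × (Int × Int))) (fuel j : Nat)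
    (cur : PySem.Dict (Int × Int) Nat) (alive : List Bool) : List (List (Int × Int)) :=
  match fuel with
  | 0 => []
  | fuel + 1 =>
    let j' := pvSkipIdx (segs.length + 1) alive segs.length j
    if h : j' < segs.length then
      let a := (segs[j']).1
      let b := (segs[j']).2
      let alive1 := alive.set j' false
      let r1 := pvTailLoop occ (segs.length + 1) [a, b] b cur alive1
      let r2 := pvHeadLoop occ (segs.length + 1) [] a r1.2.1 r1.2.2
      (r2.1.reverse ++ r1.1) :: pvMainLoop occ segs fuel (j' + 1) r2.2.1 r2.2.2
    else []

def merge_segments_to_paths_py_alt (segments : List ((Int × Int) × (Int × Int))) : List (List (Int × Int)) :=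
  let segs := segments.map (fun s => ((s.1.1, s.1.2), (s.2.1, s.2.2)))
  pvMainLoop (pvOccBuild segs) segs (segs.length + 1) 0 PySem.Dict.empty
    (List.replicate segs.length true)

-- ===== PRECONDITION & SPEC =====
def Spec_merge_segments_to_paths_py (segments : List ((Int × Int) × (Int × Int))) (out : List (List (Int × Int))) : Prop := out = merge_segments_to_paths_py_alt segments
instance (segments : List ((Int × Int) × (Int × Int))) (out : List (List (Int × Int))) : Decidable (Spec_merge_segments_to_paths_py segments out) := by unfold Spec_merge_segments_to_paths_py; infer_instance

-- ===== CLAIM (what is proved, stated in full; the proofs are below) =====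
def Claim_equal_merge_segments_to_paths_py : Prop := ∀ (segments : List ((Int × Int) × (Int × Int))), Dom_merge_segments_to_paths_py segments → Spec_merge_segments_to_paths_py segments (merge_segments_to_paths_py segments)

-- ===== LEMMAS AND PROOFS =====

theorem pvFindFwd_lt (p : Int × Int) (segs : List ((Int × Int) × (Int × Int))) (i : Nat)
    (q : Int × Int) (h : pvFindFwd p segs = some (i, q)) : i < segs.length := by
  induction segs generalizing i q with
  | nil => simp [pvFindFwd] at h
  | cons s rest ih =>
    obtain ⟨a, b⟩ := s
    simp only [pvFindFwd] at h
    split_ifs at h with h1 h2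
    · obtain ⟨hi, hq⟩ := Prod.mk.injEq .. ▸ Option.some.inj h
      simp [← hi]
    · obtain ⟨hi, hq⟩ := Prod.mk.injEq .. ▸ Option.some.inj h
      simp [← hi]
    · rw [Option.map_eq_some_iff] at h
      obtain ⟨⟨i', q'⟩, hr, hiq⟩ := h
      have := ih _ _ hr
      obtain ⟨hi, hq⟩ := Prod.mk.injEq .. ▸ hiq
      simp only [List.length_cons]
      omega

theorem pvFindBwd_lt (p : Int × Int) (segs : List ((Int × Int) × (Int × Int))) (i : Nat)
    (q : Int × Int) (h : pvFindBwd p segs = some (i, q)) : i < segs.length := by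
  induction segs generalizing i q with
  | nil => simp [pvFindBwd] at h
  | cons s rest ih =>
    obtain ⟨a, b⟩ := s
    simp only [pvFindBwd] at h
    split_ifs at h with h1 h2
    · obtain ⟨hi, hq⟩ := Prod.mk.injEq .. ▸ Option.some.inj h
      simp [← hi]
    · obtain ⟨hi, hq⟩ := Prod.mk.injEq .. ▸ Option.some.inj h
      simp [← hi]
    · rw [Option.map_eq_some_iff] at h
      obtain ⟨⟨i', q'⟩, hr, hiq⟩ := h
      have := ih _ _ hr
      obtain ⟨hi, hq⟩ := Prod.mk.injEq .. ▸ hiq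
      simp only [List.length_cons]
      omega

theorem pvExtTail_eq_none (fuel : Nat) (path : List (Int × Int))
    (segs : List ((Int × Int) × (Int × Int)))
    (h : pvFindFwd (PySem.List.pyGetD path (-1) (0, 0)) segs = none) :
    pvExtTail (fuel + 1) path segs = (path, segs) := by
  simp only [pvExtTail, h]

theorem pvExtTail_eq_some (fuel : Nat) (path : List (Int × Int))
    (segs : List ((Int × Int) × (Int × Int))) (i : Nat) (q : Int × Int)
    (h : pvFindFwd (PySem.List.pyGetD path (-1) (0, 0)) segs = some (i, q)) :
    pvExtTail (fuel + 1) path segs = pvExtTail fuel (path ++ [q]) (segs.eraseIdx i) := by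
  simp only [pvExtTail, h]

theorem pvExtHead_eq_none (fuel : Nat) (path : List (Int × Int))
    (segs : List ((Int × Int) × (Int × Int)))
    (h : pvFindBwd (PySem.List.pyGetD path 0 (0, 0)) segs = none) :
    pvExtHead (fuel + 1) path segs = (path, segs) := by
  simp only [pvExtHead, h]

theorem pvExtHead_eq_some (fuel : Nat) (path : List (Int × Int))
    (segs : List ((Int × Int) × (Int × Int))) (i : Nat) (q : Int × Int)
    (h : pvFindBwd (PySem.List.pyGetD path 0 (0, 0)) segs = some (i, q)) :
    pvExtHead (fuel + 1) path segs = pvExtHead fuel (q :: path) (segs.eraseIdx i) := by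
  simp only [pvExtHead, h]

theorem pvExtTail_len_le (fuel : Nat) : ∀ (path : List (Int × Int))
    (segs : List ((Int × Int) × (Int × Int))),
    (pvExtTail fuel path segs).2.length ≤ segs.length := by
  induction fuel with
  | zero => intro path segs; simp [pvExtTail]
  | succ fuel ih =>
    intro path segs
    cases h : pvFindFwd (PySem.List.pyGetD path (-1) (0, 0)) segs with
    | none => simp [pvExtTail_eq_none _ _ _ h]
    | some iq =>
      obtain ⟨i, q⟩ := iq
      rw [pvExtTail_eq_some _ _ _ _ _ h]
      have hi := pvFindFwd_lt _ _ _ _ h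
      have h2 := List.length_eraseIdx_of_lt hi
      have h3 := ih (path ++ [q]) (segs.eraseIdx i)
      omega

theorem pvExtTail_step (path : List (Int × Int)) (segs : List ((Int × Int) × (Int × Int)))
    (i : Nat) (q : Int × Int)
    (h : pvFindFwd (PySem.List.pyGetD path (-1) (0, 0)) segs = some (i, q)) :
    pvExtTail (segs.length + 1) path segs =
      pvExtTail ((segs.eraseIdx i).length + 1) (path ++ [q]) (segs.eraseIdx i) := by
  have hlt := pvFindFwd_lt _ _ _ _ h
  have h2 : (segs.eraseIdx i).length + 1 = segs.length := by
    rw [List.length_eraseIdx_of_lt hlt]; omega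
  conv_lhs => rw [show segs.length = (segs.eraseIdx i).length + 1 from h2.symm]
  exact pvExtTail_eq_some _ _ _ _ _ h

theorem pvExtHead_step (path : List (Int × Int)) (segs : List ((Int × Int) × (Int × Int)))
    (i : Nat) (q : Int × Int)
    (h : pvFindBwd (PySem.List.pyGetD path 0 (0, 0)) segs = some (i, q)) :
    pvExtHead (segs.length + 1) path segs =
      pvExtHead ((segs.eraseIdx i).length + 1) (q :: path) (segs.eraseIdx i) := by
  have hlt := pvFindBwd_lt _ _ _ _ h
  have h2 : (segs.eraseIdx i).length + 1 = segs.length := by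
    rw [List.length_eraseIdx_of_lt hlt]; omega
  conv_lhs => rw [show segs.length = (segs.eraseIdx i).length + 1 from h2.symm]
  exact pvExtHead_eq_some _ _ _ _ _ h

theorem pvExtHead_len_le (fuel : Nat) : ∀ (path : List (Int × Int))
    (segs : List ((Int × Int) × (Int × Int))),
    (pvExtHead fuel path segs).2.length ≤ segs.length := by
  induction fuel with
  | zero => intro path segs; simp [pvExtHead]
  | succ fuel ih =>
    intro path segs
    cases h : pvFindBwd (PySem.List.pyGetD path 0 (0, 0)) segs with
    | none => simp [pvExtHead_eq_none _ _ _ h]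
    | some iq =>
      obtain ⟨i, q⟩ := iq
      rw [pvExtHead_eq_some _ _ _ _ _ h]
      have hi := pvFindBwd_lt _ _ _ _ h
      have h2 := List.length_eraseIdx_of_lt hi
      have h3 := ih (q :: path) (segs.eraseIdx i)
      omega

-- a segment touches point p
def pvTouch (s : (Int × Int) × (Int × Int)) (p : Int × Int) : Bool :=
  decide (s.1 = p) || decide (s.2 = p)

-- the endpoint appended when s is matched at p
def pvOther (s : (Int × Int) × (Int × Int)) (p : Int × Int) : Int × Int :=
  if s.1 = p then s.2 else s.1

-- the occurrence list of point p over an indexed segment list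
def pvOccFrom (p : Int × Int) (l : List (((Int × Int) × (Int × Int)) × Nat)) :
    List (Nat × (Int × Int)) :=
  l.filterMap (fun e =>
    if e.1.1 = p then some (e.2, e.1.2)
    else if e.1.2 = p then some (e.2, e.1.1) else none)

-- the still-alive segments with their original indices
def pvAliveL (segs : List ((Int × Int) × (Int × Int))) (alive : List Bool) :
    List (((Int × Int) × (Int × Int)) × Nat) :=
  segs.zipIdx.filter (fun e => alive.getD e.2 false)

-- cursor invariant: everything before a point's cursor is dead
def pvInv (segs : List ((Int × Int) × (Int × Int))) (cur : PySem.Dict (Int × Int) Nat)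
    (alive : List Bool) : Prop :=
  ∀ p j, j < cur.getD p 0 → ∀ hj : j < (pvOccFrom p segs.zipIdx).length,
    alive.getD ((pvOccFrom p segs.zipIdx)[j]).1 false = false

theorem sk_findBwd_eq (p : Int × Int) (segs : List ((Int × Int) × (Int × Int))) :
    pvFindBwd p segs = pvFindFwd p segs := by
  induction segs with
  | nil => rfl
  | cons s rest ih =>
    obtain ⟨a, b⟩ := s
    simp only [pvFindFwd, pvFindBwd, ih]
    by_cases ha : a = p <;> by_cases hb : b = p <;> simp [ha, hb]

-- getD after set, in full generality
theorem sk_getD_set (l : List Bool) (i j : Nat) (v : Bool) :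
    (l.set i v).getD j false = if i = j ∧ i < l.length then v else l.getD j false := by
  simp only [List.getD_eq_getElem?_getD, List.getElem?_set]
  by_cases hij : i = j
  · subst hij
    by_cases hl : i < l.length
    · simp [hl]
    · simp [hl, List.getElem?_eq_none_iff.mpr (show l.length ≤ i by omega)]
  · simp [hij]

theorem sk_dead_mono (alive : List Bool) (i j : Nat)
    (h : alive.getD j false = false) : (alive.set i false).getD j false = false := by
  rw [sk_getD_set]; split
  · rfl
  · exact h

-- occurrence lists accumulate over the build fold
theorem sk_occBuild_go (l : List (((Int × Int) × (Int × Int)) × Nat))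
    (d : PySem.Dict (Int × Int) (List (Nat × (Int × Int)))) (p : Int × Int) :
    (l.foldl
      (fun d e =>
        let a := e.1.1; let b := e.1.2; let i := e.2
        let d1 := d.insert a (d.getD a [] ++ [(i, b)])
        if b ≠ a then d1.insert b (d1.getD b [] ++ [(i, a)]) else d1)
      d).getD p [] = d.getD p [] ++ pvOccFrom p l := by
  induction l generalizing d with
  | nil => simp [pvOccFrom]
  | cons e rest ih =>
    obtain ⟨⟨a, b⟩, i⟩ := e
    rw [List.foldl_cons, ih]
    simp only [pvOccFrom, List.filterMap_cons]
    by_cases hba : b = a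
    · subst hba
      by_cases hp : b = p
      · subst hp
        simp [PySem.Dict.getD_insert, pvOccFrom]
      · simp [hp, PySem.Dict.getD_insert, Ne.symm hp, pvOccFrom]
    · by_cases hap : a = p <;> by_cases hbp : b = p
      · exact absurd (hbp.trans hap.symm) hba
      · subst hap
        simp [hba, hbp, PySem.Dict.getD_insert, Ne.symm hbp, pvOccFrom]
      · subst hbp
        simp [hba, hap, PySem.Dict.getD_insert, Ne.symm hap, pvOccFrom]
      · simp [hba, hap, hbp, Ne.symm hap, Ne.symm hbp, PySem.Dict.getD_insert, pvOccFrom]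

theorem sk_occBuild_getD (segs : List ((Int × Int) × (Int × Int))) (p : Int × Int) :
    (pvOccBuild segs).getD p [] = pvOccFrom p segs.zipIdx := by
  rw [pvOccBuild, sk_occBuild_go]
  simp [PySem.Dict.getD_empty]

theorem sk_occBuild_get?_none (segs : List ((Int × Int) × (Int × Int))) (p : Int × Int)
    (h : (pvOccBuild segs).get? p = none) : pvOccFrom p segs.zipIdx = [] := by
  rw [← sk_occBuild_getD segs p]
  rw [PySem.Dict.getD_eq_get?_getD, h]
  rfl

-- pvSkip: with enough fuel, everything strictly before the returned position is dead;
-- the position itself is alive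
theorem sk_pvSkip_spec (m : Nat) : ∀ (alive : List Bool) (lst : List (Nat × (Int × Int))) (k0 : Nat),
    lst.length - k0 < m →
    (∀ j < k0, ∀ hj : j < lst.length, alive.getD (lst[j]).1 false = false) →
    (∀ j < pvSkip m alive lst k0, ∀ hj : j < lst.length, alive.getD (lst[j]).1 false = false) ∧
    (∀ h : pvSkip m alive lst k0 < lst.length,
      alive.getD ((lst[pvSkip m alive lst k0]'h)).1 false = true) := by
  induction m with
  | zero =>
    intro alive lst k1 hm h1
    omega
  | succ m ih =>
    intro alive lst k1 hm h1
    rw [pvSkip]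
    by_cases hk : k1 < lst.length
    · rw [dif_pos hk]
      by_cases ha : alive.getD (lst[k1]'hk).1 false = true
      · rw [if_pos ha]
        exact ⟨h1, fun _ => ha⟩
      · rw [if_neg ha]
        refine ih alive lst (k1 + 1) (by omega) ?_
        intro j hj hjl
        rcases Nat.lt_or_ge j k1 with h | h
        · exact h1 j h hjl
        · have : j = k1 := by omega
          subst this
          simpa using ha
    · rw [dif_neg hk]
      exact ⟨h1, fun h => absurd h hk⟩

-- find? of a list whose prefix before k is all-false and whose k-th entry is true
theorem sk_find?_at (P : (Nat × (Int × Int)) → Bool) (lst : List (Nat × (Int × Int))) (k : Nat)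
    (h0 : ∀ j < k, ∀ hj : j < lst.length, P (lst[j]) = false)
    (h1 : ∀ h : k < lst.length, P (lst[k]'h) = true) :
    lst.find? P = if h : k < lst.length then some (lst[k]'h) else none := by
  induction lst generalizing k with
  | nil => simp
  | cons x rest ih =>
    cases k with
    | zero =>
      have := h1 (by simp)
      simp_all [List.find?_cons]
    | succ k =>
      have hx : P x = false := h0 0 (by omega) (by simp)
      rw [List.find?_cons, hx]
      have := ih k (fun j hj hjl => h0 (j+1) (by omega) (by simpa using hjl))
        (fun h => h1 (by simpa using h))
      rw [this]
      by_cases hk : k < rest.length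
      · rw [dif_pos hk, dif_pos (by simpa using hk)]
        simp
      · rw [dif_neg hk, dif_neg (by simpa using hk)]

-- the correspondence between the occurrence list and the alive-filtered segment scan
theorem sk_corr (l : List (((Int × Int) × (Int × Int)) × Nat)) (p : Int × Int)
    (aliveP : Nat → Bool) :
    (pvOccFrom p l).find? (fun en => aliveP en.1) =
      ((l.filter (fun e => aliveP e.2)).find? (fun e => pvTouch e.1 p)).map
        (fun e => (e.2, pvOther e.1 p)) := by
  induction l with
  | nil => simp [pvOccFrom]
  | cons e rest ih =>
    obtain ⟨⟨a, b⟩, i⟩ := e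
    simp only [pvOccFrom, List.filterMap_cons, List.filter_cons]
    by_cases hal : aliveP i <;> by_cases hap : a = p <;> by_cases hbp : b = p <;>
      simp [hal, hap, hbp, pvTouch, pvOther, List.find?_cons, pvOccFrom] at ih ⊢ <;>
      exact ih

-- A's forward scan, characterised by find? over the indexed list
theorem sk_findFwd_none (l : List (((Int × Int) × (Int × Int)) × Nat)) (p : Int × Int)
    (h : l.find? (fun e => pvTouch e.1 p) = none) :
    pvFindFwd p (l.map (·.1)) = none := by
  induction l with
  | nil => rfl
  | cons e rest ih =>
    obtain ⟨⟨a, b⟩, i⟩ := e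
    rw [List.find?_cons] at h
    by_cases ht : pvTouch (a, b) p
    · simp [ht] at h
    · simp only [ht, Bool.false_eq_true, if_neg, reduceIte] at h
      simp only [pvTouch, Bool.or_eq_true, decide_eq_true_eq, not_or] at ht
      simp only [List.map_cons, pvFindFwd, if_neg ht.1, if_neg ht.2, ih h]
      rfl

theorem sk_findFwd_some (l : List (((Int × Int) × (Int × Int)) × Nat)) (p : Int × Int)
    (e : ((Int × Int) × (Int × Int)) × Nat)
    (h : l.find? (fun e => pvTouch e.1 p) = some e) :
    ∃ k, pvFindFwd p (l.map (·.1)) = some (k, pvOther e.1 p) ∧ k < l.length ∧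
      (l.map (·.1)).eraseIdx k = (l.eraseP (fun e => pvTouch e.1 p)).map (·.1) := by
  induction l generalizing e with
  | nil => simp at h
  | cons x rest ih =>
    obtain ⟨⟨a, b⟩, i⟩ := x
    rw [List.find?_cons] at h
    by_cases ht : pvTouch ((a, b), i).1 p
    · rw [ht] at h
      have h' : some ((a, b), i) = some e := h
      obtain rfl := Option.some.inj h' 
      refine ⟨0, ?_, by simp, by simp [List.eraseP_cons, ht]⟩
      simp only [pvTouch, Bool.or_eq_true, decide_eq_true_eq] at ht
      by_cases hap : a = p
      · simp [pvFindFwd, List.map_cons, hap, pvOther]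
      · have hbp : b = p := ht.resolve_left hap
        simp [pvFindFwd, List.map_cons, hap, hbp, pvOther]
    · rw [Bool.not_eq_true] at ht
      rw [ht] at h
      have h' : rest.find? (fun e => pvTouch e.1 p) = some e := h
      obtain ⟨k, hk, hkl, he⟩ := ih e h'
      rw [Bool.eq_false_iff, Ne] at ht
      simp only [pvTouch, Bool.or_eq_true, decide_eq_true_eq, not_or] at ht
      refine ⟨k + 1, ?_, by simp; omega, ?_⟩
      · simp [pvFindFwd, List.map_cons, ht.1, ht.2, hk]
      · have hx : pvTouch ((a, b), i).1 p = false := by simp [pvTouch, ht.1, ht.2]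
        simp only [List.map_cons, List.eraseIdx_cons_succ, List.eraseP_cons, hx, cond_false, he]

-- erasing the first match is filtering out its (unique) index
theorem sk_eraseP_eq_filter (l : List (((Int × Int) × (Int × Int)) × Nat))
    (q : (((Int × Int) × (Int × Int)) × Nat) → Bool)
    (hnd : (l.map (·.2)).Nodup) (e : ((Int × Int) × (Int × Int)) × Nat)
    (he : l.find? q = some e) :
    l.eraseP q = l.filter (fun x => decide (x.2 ≠ e.2)) := by
  induction l generalizing e with
  | nil => simp at he
  | cons x rest ih =>
    rw [List.map_cons, List.nodup_cons] at hnd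
    rw [List.find?_cons] at he
    by_cases hq : q x
    · rw [hq] at he
      have h' : some x = some e := he
      obtain rfl := Option.some.inj h'
      rw [List.eraseP_cons, hq, cond_true, List.filter_cons]
      simp only [decide_eq_true_eq, ne_eq, not_not]
      rw [if_neg (by simp)]
      rw [List.filter_eq_self.mpr]
      intro y hy
      simp only [decide_eq_true_eq]
      intro hc
      exact hnd.1 (hc ▸ List.mem_map_of_mem hy)
    · rw [Bool.not_eq_true] at hq
      rw [hq] at he
      have h' : rest.find? q = some e := he
      have hmem : e ∈ rest := List.mem_of_find?_eq_some h'
      rw [List.eraseP_cons, hq, cond_false, List.filter_cons]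
      rw [if_pos (by
        simp only [decide_eq_true_eq]
        intro hc
        exact hnd.1 (hc ▸ List.mem_map_of_mem hmem))]
      rw [ih hnd.2 e h']

-- every member of an indexed list from zipIdx has index below the length
theorem sk_zipIdx_snd_lt (l : List ((Int × Int) × (Int × Int)))
    (e : ((Int × Int) × (Int × Int)) × Nat) (h : e ∈ l.zipIdx) : e.2 < l.length := by
  have := List.snd_lt_add_of_mem_zipIdx h
  simpa using this

theorem sk_aliveL_len_le (segs : List ((Int × Int) × (Int × Int))) (alive : List Bool) :
    (pvAliveL segs alive).length ≤ segs.length := by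
  calc (pvAliveL segs alive).length ≤ segs.zipIdx.length := List.length_filter_le _ _
  _ = segs.length := by simp

-- killing index i filters it out of the alive list
theorem sk_aliveL_set_false (segs : List ((Int × Int) × (Int × Int))) (alive : List Bool)
    (i : Nat) (hi : i < alive.length) :
    pvAliveL segs (alive.set i false) =
      (pvAliveL segs alive).filter (fun x => decide (x.2 ≠ i)) := by
  unfold pvAliveL
  rw [List.filter_filter]
  apply List.filter_congr
  intro e _
  rw [sk_getD_set]
  by_cases hei : i = e.2
  · simp [hei, hei ▸ hi]
  · have hne : ¬ e.2 = i := fun hc => hei hc.symm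
    simp [hei, hne]

-- membership of the chosen entry: its index is a live index below the length
theorem sk_find?_mem_aliveL (segs : List ((Int × Int) × (Int × Int))) (alive : List Bool)
    (p : Int × Int) (e : ((Int × Int) × (Int × Int)) × Nat)
    (h : (pvAliveL segs alive).find? (fun e => pvTouch e.1 p) = some e) :
    e.2 < segs.length := by
  have hm : e ∈ pvAliveL segs alive := List.mem_of_find?_eq_some h
  have : e ∈ segs.zipIdx := List.mem_of_mem_filter hm

  exact sk_zipIdx_snd_lt segs e this

theorem sk_aliveL_nodup (segs : List ((Int × Int) × (Int × Int))) (alive : List Bool) :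
    ((pvAliveL segs alive).map (·.2)).Nodup := by
  have h1 : (segs.zipIdx.map Prod.snd).Nodup := List.nodup_zipIdx_map_snd segs
  have h2 : (pvAliveL segs alive).Sublist segs.zipIdx := List.filter_sublist
  exact (h2.map Prod.snd).nodup h1

-- B's take returns none exactly when A's scan finds nothing; state unchanged except the cursor
theorem sk_take_none (segs0 : List ((Int × Int) × (Int × Int)))
    (cur : PySem.Dict (Int × Int) Nat) (alive : List Bool) (p : Int × Int)
    (hInv : pvInv segs0 cur alive)
    (hA : pvFindFwd p ((pvAliveL segs0 alive).map (·.1)) = none) :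
    ∃ cur', pvTake (pvOccBuild segs0) cur alive p = (none, cur', alive) ∧
      pvInv segs0 cur' alive := by
  have hf : (pvAliveL segs0 alive).find? (fun e => pvTouch e.1 p) = none := by
    cases hff : (pvAliveL segs0 alive).find? (fun e => pvTouch e.1 p) with
    | none => rfl
    | some e =>
      obtain ⟨k, hk, -, -⟩ := sk_findFwd_some _ _ _ hff
      rw [hA] at hk
      cases hk
  have hocc : (pvOccFrom p segs0.zipIdx).find? (fun en => alive.getD en.1 false) = none := by
    rw [sk_corr segs0.zipIdx p (fun n => alive.getD n false)]
    have : segs0.zipIdx.filter (fun e => alive.getD e.2 false) = pvAliveL segs0 alive := rfl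
    rw [this, hf]
    rfl
  unfold pvTake
  cases hget : (pvOccBuild segs0).get? p with
  | none => exact ⟨cur, rfl, hInv⟩
  | some lst =>
    have hlst : lst = pvOccFrom p segs0.zipIdx := by
      have h1 := sk_occBuild_getD segs0 p
      rw [PySem.Dict.getD_eq_get?_getD, hget] at h1
      simpa using h1
    subst hlst
    obtain ⟨hdead, halive⟩ := sk_pvSkip_spec ((pvOccFrom p segs0.zipIdx).length + 1) alive
      (pvOccFrom p segs0.zipIdx) (cur.getD p 0) (by omega) (hInv p)
    have hfa := sk_find?_at (fun en => alive.getD en.1 false) (pvOccFrom p segs0.zipIdx)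
      (pvSkip ((pvOccFrom p segs0.zipIdx).length + 1) alive (pvOccFrom p segs0.zipIdx) (cur.getD p 0)) hdead halive
    by_cases hk : pvSkip ((pvOccFrom p segs0.zipIdx).length + 1) alive (pvOccFrom p segs0.zipIdx) (cur.getD p 0) <
        (pvOccFrom p segs0.zipIdx).length
    · rw [dif_pos hk] at hfa
      rw [hfa] at hocc
      cases hocc
    · refine ⟨cur.insert p (pvSkip ((pvOccFrom p segs0.zipIdx).length + 1) alive (pvOccFrom p segs0.zipIdx) (cur.getD p 0)), ?_, ?_⟩
      · simp only [dif_neg hk]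
      · intro p' j hj hjl
        by_cases hp' : p' = p
        · simp only [hp'] at hj hjl ⊢
          rw [PySem.Dict.getD_insert] at hj
          rw [if_pos rfl] at hj
          exact hdead j hj hjl
        · rw [PySem.Dict.getD_insert, if_neg hp'] at hj
          exact hInv p' j hj hjl

-- B's take returns exactly the endpoint A's scan appends, and kills the same segment
theorem sk_take_some (segs0 : List ((Int × Int) × (Int × Int)))
    (cur : PySem.Dict (Int × Int) Nat) (alive : List Bool) (p : Int × Int)
    (k : Nat) (q : Int × Int)
    (hInv : pvInv segs0 cur alive) (hlen : alive.length = segs0.length)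
    (hA : pvFindFwd p ((pvAliveL segs0 alive).map (·.1)) = some (k, q)) :
    ∃ cur' alive', pvTake (pvOccBuild segs0) cur alive p = (some q, cur', alive') ∧
      (pvAliveL segs0 alive').map (·.1) = ((pvAliveL segs0 alive).map (·.1)).eraseIdx k ∧
      pvInv segs0 cur' alive' ∧ alive'.length = segs0.length ∧
      (∀ j, alive.getD j false = false → alive'.getD j false = false) := by
  obtain ⟨e, hf⟩ : ∃ e, (pvAliveL segs0 alive).find? (fun e => pvTouch e.1 p) = some e := by
    cases hff : (pvAliveL segs0 alive).find? (fun e => pvTouch e.1 p) with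
    | none => rw [sk_findFwd_none _ _ hff] at hA; cases hA
    | some e => exact ⟨e, rfl⟩
  obtain ⟨k', hk', hklt, herase⟩ := sk_findFwd_some _ _ _ hf
  rw [hA] at hk'
  obtain ⟨hkk, hqq⟩ := Prod.mk.injEq .. ▸ Option.some.inj hk'
  subst hkk
  have hocc : (pvOccFrom p segs0.zipIdx).find? (fun en => alive.getD en.1 false) =
      some (e.2, pvOther e.1 p) := by
    rw [sk_corr segs0.zipIdx p (fun n => alive.getD n false)]
    have : segs0.zipIdx.filter (fun e => alive.getD e.2 false) = pvAliveL segs0 alive := rfl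
    rw [this, hf]
    rfl
  have he2 : e.2 < segs0.length := sk_find?_mem_aliveL segs0 alive p e hf
  unfold pvTake
  cases hget : (pvOccBuild segs0).get? p with
  | none =>
    rw [sk_occBuild_get?_none segs0 p hget] at hocc
    cases hocc
  | some lst =>
    have hlst : lst = pvOccFrom p segs0.zipIdx := by
      have h1 := sk_occBuild_getD segs0 p
      rw [PySem.Dict.getD_eq_get?_getD, hget] at h1
      simpa using h1
    subst hlst
    obtain ⟨hdead, halive⟩ := sk_pvSkip_spec ((pvOccFrom p segs0.zipIdx).length + 1) alive
      (pvOccFrom p segs0.zipIdx) (cur.getD p 0) (by omega) (hInv p)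
    have hfa := sk_find?_at (fun en => alive.getD en.1 false) (pvOccFrom p segs0.zipIdx)
      (pvSkip ((pvOccFrom p segs0.zipIdx).length + 1) alive (pvOccFrom p segs0.zipIdx) (cur.getD p 0)) hdead halive
    by_cases hk : pvSkip ((pvOccFrom p segs0.zipIdx).length + 1) alive (pvOccFrom p segs0.zipIdx) (cur.getD p 0) <
        (pvOccFrom p segs0.zipIdx).length
    case neg =>
      rw [dif_neg hk] at hfa
      rw [hfa] at hocc
      cases hocc
    case pos =>
    rw [dif_pos hk] at hfa
    rw [hfa] at hocc
    have hentry := Option.some.inj hocc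
    refine ⟨cur.insert p (pvSkip ((pvOccFrom p segs0.zipIdx).length + 1) alive (pvOccFrom p segs0.zipIdx) (cur.getD p 0) + 1),
      alive.set ((pvOccFrom p segs0.zipIdx)[pvSkip ((pvOccFrom p segs0.zipIdx).length + 1) alive (pvOccFrom p segs0.zipIdx) (cur.getD p 0)]'hk).1 false, ?_, ?_, ?_, ?_, ?_⟩
    · simp only [dif_pos hk]
      rw [show (((pvOccFrom p segs0.zipIdx)[pvSkip ((pvOccFrom p segs0.zipIdx).length + 1) alive (pvOccFrom p segs0.zipIdx) (cur.getD p 0)]'hk)).2 = pvOther e.1 p from by rw [hentry], hqq]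
    · rw [show (((pvOccFrom p segs0.zipIdx)[pvSkip ((pvOccFrom p segs0.zipIdx).length + 1) alive (pvOccFrom p segs0.zipIdx) (cur.getD p 0)]'hk)).1 = e.2 from by rw [hentry]]
      rw [sk_aliveL_set_false segs0 alive e.2 (hlen ▸ he2)]
      rw [herase]
      rw [sk_eraseP_eq_filter (pvAliveL segs0 alive) _ (sk_aliveL_nodup segs0 alive) e hf]
    · intro p' j hj hjl
      by_cases hp' : p' = p
      · simp only [hp'] at hj hjl ⊢
        rw [PySem.Dict.getD_insert, if_pos rfl] at hj
        rcases Nat.lt_or_ge j (pvSkip ((pvOccFrom p segs0.zipIdx).length + 1) alive (pvOccFrom p segs0.zipIdx) (cur.getD p 0)) with h | h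
        · exact sk_dead_mono alive _ _ (hdead j h hjl)
        · have hjk : j = pvSkip ((pvOccFrom p segs0.zipIdx).length + 1) alive (pvOccFrom p segs0.zipIdx) (cur.getD p 0) := by omega
          subst hjk
          rw [sk_getD_set]
          rw [if_pos ⟨rfl, by rw [hentry]; exact hlen ▸ he2⟩]
      · rw [PySem.Dict.getD_insert, if_neg hp'] at hj
        exact sk_dead_mono alive _ _ (hInv p' j hj hjl)
    · rw [List.length_set]
      exact hlen
    · intro j hj
      exact sk_dead_mono alive _ _ hj

theorem sk_skipIdx_spec (m : Nat) : ∀ (alive : List Bool) (n j0 : Nat), n - j0 < m → j0 ≤ n →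
    (∀ i < j0, alive.getD i false = false) →
    (pvSkipIdx m alive n j0 ≤ n ∧
     (∀ i < pvSkipIdx m alive n j0, alive.getD i false = false) ∧
     (pvSkipIdx m alive n j0 < n → alive.getD (pvSkipIdx m alive n j0) false = true)) := by
  induction m with
  | zero =>
    intro alive n j1 hm hjn1 h1
    omega
  | succ m ih =>
    intro alive n j1 hm hjn1 h1
    rw [pvSkipIdx]
    by_cases hk : j1 < n
    · rw [dif_pos hk]
      by_cases ha : alive.getD j1 false = true
      · rw [if_pos ha]
        exact ⟨hjn1, h1, fun _ => ha⟩
      · rw [if_neg ha]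
        refine ih alive n (j1 + 1) (by omega) (by omega) ?_
        intro i hi
        rcases Nat.lt_or_ge i j1 with h | h
        · exact h1 i h
        · have : i = j1 := by omega
          subst this
          simpa using ha
    · rw [dif_neg hk]
      exact ⟨hjn1, h1, fun h => absurd h hk⟩

theorem sk_g (l : List Bool) (j : Nat) (h : l.getD j false = false) :
    l[j]?.getD false = false := by
  rwa [List.getD_eq_getElem?_getD] at h

-- the first alive index heads the alive list; killing it gives the tail
theorem sk_aliveL_head_aux (segs : List ((Int × Int) × (Int × Int))) :
    ∀ (o : Nat) (alive : List Bool) (j' : Nat),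
    (∀ i < j', alive.getD i false = false) → o ≤ j' → ∀ hj : j' - o < segs.length,
    alive.getD j' false = true →
    (segs.zipIdx o).filter (fun e => alive.getD e.2 false) =
      (segs[j' - o], j') :: (segs.zipIdx o).filter (fun e => (alive.set j' false).getD e.2 false) := by
  induction segs with
  | nil =>
    intro o alive j' _ _ hj _
    simp at hj
  | cons s rest ih =>
    intro o alive j' hdead ho hj halive
    rw [List.zipIdx_cons]
    by_cases hoj : o = j'
    · subst hoj
      have hkill : (alive.set o false).getD o false = false := by
        rw [sk_getD_set]
        split
        · rfl
        · next hcc =>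
          exfalso
          apply hcc
          refine ⟨rfl, ?_⟩
          by_contra hcl
          rw [List.getD_eq_getElem?_getD, List.getElem?_eq_none_iff.mpr (by omega)] at halive
          simp at halive
      have hkill2 := sk_g _ _ hkill
      rw [List.filter_cons, List.filter_cons]
      rw [if_pos (by simpa using halive)]
      rw [if_neg (by simp [hkill2])]
      simp only [Nat.sub_self, List.getElem_cons_zero]
      congr 1
      apply List.filter_congr
      intro e he
      have h2 : o + 1 ≤ e.2 := List.le_snd_of_mem_zipIdx he
      rw [sk_getD_set, if_neg (by rintro ⟨h, -⟩; omega)]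
    · have hoj' : o < j' := by omega
      have hdo : alive.getD o false = false := hdead o hoj'
      have hdo2 := sk_g _ _ hdo
      have hdo3 := sk_g _ _ (sk_dead_mono alive j' o hdo)
      rw [List.filter_cons, List.filter_cons]
      rw [if_neg (by simp [hdo2]), if_neg (by simp [hdo3])]
      have hj2 : j' - (o + 1) < rest.length := by
        simp only [List.length_cons] at hj
        omega
      rw [ih (o + 1) alive j' hdead (by omega) hj2 halive]
      have hidx : j' - o = (j' - (o + 1)) + 1 := by omega
      have hgoal : (s :: rest)[j' - o]'(by simpa using hj) = rest[j' - (o + 1)]'hj2 := by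
        simp only [hidx, List.getElem_cons_succ]
      rw [hgoal]

theorem sk_aliveL_head (segs : List ((Int × Int) × (Int × Int))) (alive : List Bool) (j' : Nat)
    (hdead : ∀ i < j', alive.getD i false = false) (hj : j' < segs.length)
    (halive : alive.getD j' false = true) :
    pvAliveL segs alive = (segs[j'], j') :: pvAliveL segs (alive.set j' false) := by
  have := sk_aliveL_head_aux segs 0 alive j' hdead (by omega) (by simpa using hj) halive
  simpa [pvAliveL] using this

theorem sk_aliveL_nil (segs : List ((Int × Int) × (Int × Int))) (alive : List Bool)
    (hdead : ∀ i < segs.length, alive.getD i false = false) :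
    pvAliveL segs alive = [] := by
  apply List.filter_eq_nil_iff.mpr
  intro e he
  have := hdead e.2 (sk_zipIdx_snd_lt segs e he)
  rw [List.getD_eq_getElem?_getD] at this
  simp [this]

-- A's tail extension path is the start path plus some extension
theorem sk_extTail_append (fuel : Nat) : ∀ (path : List (Int × Int))
    (segs : List ((Int × Int) × (Int × Int))),
    ∃ ext, (pvExtTail fuel path segs).1 = path ++ ext := by
  induction fuel with
  | zero => intro path segs; exact ⟨[], by simp [pvExtTail]⟩
  | succ fuel ih =>
    intro path segs
    cases h : pvFindFwd (PySem.List.pyGetD path (-1) (0, 0)) segs with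
    | none => exact ⟨[], by simp [pvExtTail_eq_none _ _ _ h]⟩
    | some iq =>
      obtain ⟨i, q⟩ := iq
      obtain ⟨ext, hext⟩ := ih (path ++ [q]) (segs.eraseIdx i)
      exact ⟨q :: ext, by rw [pvExtTail_eq_some _ _ _ _ _ h, hext]; simp⟩

-- the tail-extension loops agree
theorem sk_tailLoop (segs0 : List ((Int × Int) × (Int × Int))) :
    ∀ (fuel : Nat) (segsA : List ((Int × Int) × (Int × Int))) (tail' : List (Int × Int))
      (pt : Int × Int) (cur : PySem.Dict (Int × Int) Nat) (alive : List Bool),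
    (pvAliveL segs0 alive).map (·.1) = segsA → pvInv segs0 cur alive →
    alive.length = segs0.length → segsA.length < fuel →
    ∃ cur' alive',
      pvTailLoop (pvOccBuild segs0) fuel (tail' ++ [pt]) pt cur alive =
        ((pvExtTail (segsA.length + 1) (tail' ++ [pt]) segsA).1, cur', alive') ∧
      (pvAliveL segs0 alive').map (·.1) = (pvExtTail (segsA.length + 1) (tail' ++ [pt]) segsA).2 ∧
      pvInv segs0 cur' alive' ∧ alive'.length = segs0.length ∧
      (∀ j, alive.getD j false = false → alive'.getD j false = false) := by
  intro fuel
  induction fuel with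
  | zero => intro segsA _ _ _ _ _ _ _ hf; omega
  | succ fuel ih =>
    intro segsA tail' pt cur alive hR hInv hlen hfuel
    have hlast : PySem.List.pyGetD (tail' ++ [pt]) (-1) ((0 : Int), (0 : Int)) = pt :=
      PySem.List.pyGetD_neg_one_append_singleton ..
    cases hA : pvFindFwd pt segsA with
    | none =>
      obtain ⟨cur', hTake, hInv'⟩ := sk_take_none segs0 cur alive pt hInv (hR ▸ hA)
      have hAeq := pvExtTail_eq_none segsA.length (tail' ++ [pt]) segsA (by rw [hlast]; exact hA)
      refine ⟨cur', alive, ?_, ?_, hInv', hlen, fun j h => h⟩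
      · simp only [pvTailLoop, hTake, hAeq]
      · rw [hAeq]
        exact hR
    | some kq =>
      obtain ⟨k, q⟩ := kq
      obtain ⟨cur1, alive1, hTake, hR1, hInv1, hlen1, hmono1⟩ :=
        sk_take_some segs0 cur alive pt k q hInv hlen (hR ▸ hA)
      have hAeq := pvExtTail_step (tail' ++ [pt]) segsA k q (by rw [hlast]; exact hA)
      have hklt : k < segsA.length := pvFindFwd_lt pt segsA k q hA
      have hfuel' : (segsA.eraseIdx k).length < fuel := by
        rw [List.length_eraseIdx_of_lt hklt]; omega
      have hR1' : (pvAliveL segs0 alive1).map (·.1) = segsA.eraseIdx k := by rw [hR1, hR]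
      obtain ⟨cur', alive', hLoop, hR', hInv', hlen', hmono'⟩ :=
        ih (segsA.eraseIdx k) (tail' ++ [pt]) q cur1 alive1 hR1' hInv1 hlen1 hfuel'
      refine ⟨cur', alive', ?_, ?_, hInv', hlen', fun j h => hmono' j (hmono1 j h)⟩
      · simp only [pvTailLoop, hTake, hAeq]
        exact hLoop
      · rw [hAeq]
        exact hR'

-- the head-extension loops agree (collected extensions, reversed at the end)
theorem sk_headLoop (segs0 : List ((Int × Int) × (Int × Int))) :
    ∀ (fuel : Nat) (segsA : List ((Int × Int) × (Int × Int))) (acc : List (Int × Int))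
      (pt : Int × Int) (path : List (Int × Int))
      (cur : PySem.Dict (Int × Int) Nat) (alive : List Bool),
    (pvAliveL segs0 alive).map (·.1) = segsA → pvInv segs0 cur alive →
    alive.length = segs0.length → segsA.length < fuel →
    ∃ ext cur' alive',
      pvHeadLoop (pvOccBuild segs0) fuel acc pt cur alive = (acc ++ ext, cur', alive') ∧
      (pvExtHead (segsA.length + 1) (pt :: path) segsA).1 = ext.reverse ++ pt :: path ∧
      (pvAliveL segs0 alive').map (·.1) = (pvExtHead (segsA.length + 1) (pt :: path) segsA).2 ∧
      pvInv segs0 cur' alive' ∧ alive'.length = segs0.length ∧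
      (∀ j, alive.getD j false = false → alive'.getD j false = false) := by
  intro fuel
  induction fuel with
  | zero => intro segsA _ _ _ _ _ _ _ _ hf; omega
  | succ fuel ih =>
    intro segsA acc pt path cur alive hR hInv hlen hfuel
    have hfirst : PySem.List.pyGetD (pt :: path) 0 ((0 : Int), (0 : Int)) = pt :=
      PySem.List.pyGetD_zero_cons ..
    cases hA : pvFindFwd pt segsA with
    | none =>
      obtain ⟨cur', hTake, hInv'⟩ := sk_take_none segs0 cur alive pt hInv (hR ▸ hA)
      have hAeq := pvExtHead_eq_none segsA.length (pt :: path) segsA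
        (by rw [hfirst, sk_findBwd_eq]; exact hA)
      refine ⟨[], cur', alive, ?_, ?_, ?_, hInv', hlen, fun j h => h⟩
      · simp only [pvHeadLoop, hTake, List.append_nil]
      · rw [hAeq]
        simp
      · rw [hAeq]
        exact hR
    | some kq =>
      obtain ⟨k, q⟩ := kq
      obtain ⟨cur1, alive1, hTake, hR1, hInv1, hlen1, hmono1⟩ :=
        sk_take_some segs0 cur alive pt k q hInv hlen (hR ▸ hA)
      have hAeq := pvExtHead_step (pt :: path) segsA k q
        (by rw [hfirst, sk_findBwd_eq]; exact hA)
      have hklt : k < segsA.length := pvFindFwd_lt pt segsA k q hA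
      have hfuel' : (segsA.eraseIdx k).length < fuel := by
        rw [List.length_eraseIdx_of_lt hklt]; omega
      have hR1' : (pvAliveL segs0 alive1).map (·.1) = segsA.eraseIdx k := by rw [hR1, hR]
      obtain ⟨ext1, cur', alive', hLoop, hHead, hR', hInv', hlen', hmono'⟩ :=
        ih (segsA.eraseIdx k) (acc ++ [q]) q (pt :: path) cur1 alive1 hR1' hInv1 hlen1 hfuel'
      refine ⟨q :: ext1, cur', alive', ?_, ?_, ?_, hInv', hlen', fun j h => hmono' j (hmono1 j h)⟩
      · simp only [pvHeadLoop, hTake]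
        rw [hLoop]
        simp
      · rw [hAeq, hHead]
        simp
      · rw [hAeq]
        exact hR'

-- unfolding of A's main loop at a cons cell, plus the nil cases
theorem sk_mergeLoop_nil (fuel : Nat) : pvMergeLoop fuel [] = [] := by
  cases fuel <;> rfl

theorem sk_mergeLoop_cons (fuel : Nat) (s : (Int × Int) × (Int × Int))
    (rest : List ((Int × Int) × (Int × Int))) :
    pvMergeLoop (fuel + 1) (s :: rest) =
      (pvExtHead ((pvExtTail (rest.length + 1) [s.1, s.2] rest).2.length + 1)
          (pvExtTail (rest.length + 1) [s.1, s.2] rest).1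
          (pvExtTail (rest.length + 1) [s.1, s.2] rest).2).1 ::
        pvMergeLoop fuel
          (pvExtHead ((pvExtTail (rest.length + 1) [s.1, s.2] rest).2.length + 1)
            (pvExtTail (rest.length + 1) [s.1, s.2] rest).1
            (pvExtTail (rest.length + 1) [s.1, s.2] rest).2).2 := by
  obtain ⟨a, b⟩ := s
  rfl

-- the main loops agree
theorem sk_mainLoop (segs0 : List ((Int × Int) × (Int × Int))) :
    ∀ (fuel : Nat), ∀ (fuelA j : Nat) (cur : PySem.Dict (Int × Int) Nat) (alive : List Bool)
      (segsA : List ((Int × Int) × (Int × Int))),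
    (pvAliveL segs0 alive).map (·.1) = segsA → pvInv segs0 cur alive →
    alive.length = segs0.length → (∀ i < j, alive.getD i false = false) →
    j ≤ segs0.length → segsA.length < fuel → segsA.length ≤ fuelA →
    pvMainLoop (pvOccBuild segs0) segs0 fuel j cur alive = pvMergeLoop fuelA segsA := by
  intro fuel
  induction fuel with
  | zero => intro fuelA j _ _ _ _ _ _ _ _ hf _; omega
  | succ fuel ih =>
    intro fuelA j cur alive segsA hR hInv hlen hj hjn hfuel hfuelA
    obtain ⟨hj'n, hdead, halive⟩ := sk_skipIdx_spec (segs0.length + 1) alive segs0.length j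
      (by omega) hjn hj
    by_cases hj' : pvSkipIdx (segs0.length + 1) alive segs0.length j < segs0.length
    · have halive' := halive hj'
      have hhead := sk_aliveL_head segs0 alive (pvSkipIdx (segs0.length + 1) alive segs0.length j) hdead hj' halive'
      have hsegsA : segsA = segs0[pvSkipIdx (segs0.length + 1) alive segs0.length j] ::
          (pvAliveL segs0 (alive.set (pvSkipIdx (segs0.length + 1) alive segs0.length j) false)).map (·.1) := by
        rw [← hR, hhead, List.map_cons]
      have hInv1 : pvInv segs0 cur (alive.set (pvSkipIdx (segs0.length + 1) alive segs0.length j) false) :=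
        fun p j1 hj1 hjl => sk_dead_mono alive _ _ (hInv p j1 hj1 hjl)
      have hlen1 : (alive.set (pvSkipIdx (segs0.length + 1) alive segs0.length j) false).length = segs0.length := by
        rw [List.length_set]; exact hlen
      have hrest_lt : ((pvAliveL segs0 (alive.set (pvSkipIdx (segs0.length + 1) alive segs0.length j) false)).map
          (·.1)).length < segs0.length + 1 := by
        rw [List.length_map]
        have := sk_aliveL_len_le segs0 (alive.set (pvSkipIdx (segs0.length + 1) alive segs0.length j) false)
        omega
      obtain ⟨cur1, alive1, hLoop1, hR1, hInv2, hlen2, hmono2⟩ :=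
        sk_tailLoop segs0 (segs0.length + 1)
          ((pvAliveL segs0 (alive.set (pvSkipIdx (segs0.length + 1) alive segs0.length j) false)).map (·.1))
          [(segs0[pvSkipIdx (segs0.length + 1) alive segs0.length j]).1]
          (segs0[pvSkipIdx (segs0.length + 1) alive segs0.length j]).2 cur
          (alive.set (pvSkipIdx (segs0.length + 1) alive segs0.length j) false) rfl hInv1 hlen1 hrest_lt
      obtain ⟨ext0, hext0⟩ := sk_extTail_append
        (((pvAliveL segs0 (alive.set (pvSkipIdx (segs0.length + 1) alive segs0.length j) false)).map (·.1)).length + 1)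
        [(segs0[pvSkipIdx (segs0.length + 1) alive segs0.length j]).1, (segs0[pvSkipIdx (segs0.length + 1) alive segs0.length j]).2]
        ((pvAliveL segs0 (alive.set (pvSkipIdx (segs0.length + 1) alive segs0.length j) false)).map (·.1))
      have hr1len : ((pvExtTail
          (((pvAliveL segs0 (alive.set (pvSkipIdx (segs0.length + 1) alive segs0.length j) false)).map (·.1)).length + 1)
          [(segs0[pvSkipIdx (segs0.length + 1) alive segs0.length j]).1, (segs0[pvSkipIdx (segs0.length + 1) alive segs0.length j]).2]
          ((pvAliveL segs0 (alive.set (pvSkipIdx (segs0.length + 1) alive segs0.length j) false)).map (·.1))).2).length <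
          segs0.length + 1 := by
        have := pvExtTail_len_le
          (((pvAliveL segs0 (alive.set (pvSkipIdx (segs0.length + 1) alive segs0.length j) false)).map (·.1)).length + 1)
          [(segs0[pvSkipIdx (segs0.length + 1) alive segs0.length j]).1, (segs0[pvSkipIdx (segs0.length + 1) alive segs0.length j]).2]
          ((pvAliveL segs0 (alive.set (pvSkipIdx (segs0.length + 1) alive segs0.length j) false)).map (·.1))
        omega
      obtain ⟨ext, cur2, alive2, hLoop2, hHead, hR2, hInv3, hlen3, hmono3⟩ :=
        sk_headLoop segs0 (segs0.length + 1) _ []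
          (segs0[pvSkipIdx (segs0.length + 1) alive segs0.length j]).1
          ((segs0[pvSkipIdx (segs0.length + 1) alive segs0.length j]).2 :: ext0) cur1 alive1 hR1 hInv2 hlen2 hr1len
      simp only [List.singleton_append] at hLoop1 hHead hR2
      simp only [List.nil_append] at hLoop2
      simp only [List.cons_append, List.nil_append] at hext0
      cases fuelA with
      | zero =>
        exfalso
        rw [hsegsA] at hfuelA
        simp at hfuelA
      | succ fA => ?_
      rw [hsegsA, sk_mergeLoop_cons]
      simp only [pvMainLoop]
      rw [dif_pos hj']
      rw [hLoop1]
      simp only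
      rw [hLoop2]
      simp only
      rw [hext0, hHead]
      congr 1
      have hA1 := pvExtTail_len_le
        (((pvAliveL segs0 (alive.set (pvSkipIdx (segs0.length + 1) alive segs0.length j) false)).map (·.1)).length + 1)
        [(segs0[pvSkipIdx (segs0.length + 1) alive segs0.length j]).1, (segs0[pvSkipIdx (segs0.length + 1) alive segs0.length j]).2]
        ((pvAliveL segs0 (alive.set (pvSkipIdx (segs0.length + 1) alive segs0.length j) false)).map (·.1))
      have hA2 := pvExtHead_len_le
        ((pvExtTail (((pvAliveL segs0 (alive.set (pvSkipIdx (segs0.length + 1) alive segs0.length j) false)).map (·.1)).length + 1)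
            [(segs0[pvSkipIdx (segs0.length + 1) alive segs0.length j]).1, (segs0[pvSkipIdx (segs0.length + 1) alive segs0.length j]).2]
            ((pvAliveL segs0 (alive.set (pvSkipIdx (segs0.length + 1) alive segs0.length j) false)).map (·.1))).2.length + 1)
        ((segs0[pvSkipIdx (segs0.length + 1) alive segs0.length j]).1 :: (segs0[pvSkipIdx (segs0.length + 1) alive segs0.length j]).2 :: ext0)
        (pvExtTail (((pvAliveL segs0 (alive.set (pvSkipIdx (segs0.length + 1) alive segs0.length j) false)).map (·.1)).length + 1)
          [(segs0[pvSkipIdx (segs0.length + 1) alive segs0.length j]).1, (segs0[pvSkipIdx (segs0.length + 1) alive segs0.length j]).2]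
          ((pvAliveL segs0 (alive.set (pvSkipIdx (segs0.length + 1) alive segs0.length j) false)).map (·.1))).2
      have hseglen : segsA.length =
          ((pvAliveL segs0 (alive.set (pvSkipIdx (segs0.length + 1) alive segs0.length j) false)).map (·.1)).length + 1 := by
        rw [hsegsA]; simp
      apply ih fA (pvSkipIdx (segs0.length + 1) alive segs0.length j + 1) cur2 alive2 _ hR2 hInv3 hlen3
      · intro i hi
        rcases Nat.lt_or_ge i (pvSkipIdx (segs0.length + 1) alive segs0.length j) with h | h
        · exact hmono3 i (hmono2 i (sk_dead_mono alive (pvSkipIdx (segs0.length + 1) alive segs0.length j) i (hdead i h)))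
        · have hieq : i = pvSkipIdx (segs0.length + 1) alive segs0.length j := by omega
          refine hmono3 i (hmono2 i ?_)
          rw [hieq, sk_getD_set, if_pos ⟨rfl, by rw [hlen]; exact hj'⟩]
      · omega
      · omega
      · have : segsA.length ≤ fA + 1 := hfuelA
        omega
    · have hn : pvSkipIdx (segs0.length + 1) alive segs0.length j = segs0.length := by omega
      have hnil : segsA = [] := by
        rw [← hR, sk_aliveL_nil segs0 alive (fun i hi => hdead i (by omega))]
        rfl
      rw [hnil, sk_mergeLoop_nil]
      rw [pvMainLoop]
      rw [dif_neg (by rw [hn]; omega)]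

-- ===== VERDICT (by name: the statement is the Claim_ definition above) =====
theorem merge_segments_to_paths_py_spec : Claim_equal_merge_segments_to_paths_py := by
  intro segments _
  unfold Spec_merge_segments_to_paths_py merge_segments_to_paths_py merge_segments_to_paths_py_alt
  apply Eq.symm
  apply sk_mainLoop _ ((segments.map (fun s => ((s.1.1, s.1.2), (s.2.1, s.2.2)))).length + 1)
    ((segments.map (fun s => ((s.1.1, s.1.2), (s.2.1, s.2.2)))).length)
  · have h1 : pvAliveL (segments.map (fun s => ((s.1.1, s.1.2), (s.2.1, s.2.2))))
        (List.replicate (segments.map (fun s => ((s.1.1, s.1.2), (s.2.1, s.2.2)))).length true) =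
        (segments.map (fun s => ((s.1.1, s.1.2), (s.2.1, s.2.2)))).zipIdx := by
      apply List.filter_eq_self.mpr
      intro e he
      have h2 := sk_zipIdx_snd_lt _ e he
      simp only [List.length_map] at h2 ⊢
      rw [List.getD_eq_getElem?_getD, List.getElem?_replicate]
      simp [h2]
    rw [h1]
    exact List.zipIdx_map_fst 0 _
  · intro p j1 hj1 hjl
    rw [PySem.Dict.getD_empty] at hj1
    omega
  · exact List.length_replicate ..
  · intro i hi
    omega
  · exact Nat.zero_le _
  · simp
  · exact Nat.le_refl _
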